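-- pv_equiv track=rewrite | github.com/AlexDitts/By_Skillbox | python_basic/Module20/03_function/main.py | slice_by_elem
-- ===== SOURCE A (Python) =====
-- def slice_by_elem(iter_col, elem) -> tuple:
--     start_ind = len(iter_col)
--     finish_ind = len(iter_col)
--     flag = False
--     for ind, i_elem in enumerate(iter_col):
--         if i_elem == elem:
--             if not flag:
--                 start_ind = ind
--                 flag = True
--             elif flag:
--                 finish_ind = ind
--                 break
--     return iter_col[start_ind: finish_ind + 1]
-- ===== SOURCE B (Python) =====
-- def slice_by_elem(iter_col, elem) -> tuple:
--     n = len(iter_col)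
--     if elem not in iter_col:
--         return iter_col[n:n + 1]
--     start = iter_col.index(elem)
--     rest = iter_col[start + 1:]
--     if elem in rest:
--         finish = start + 1 + rest.index(elem)
--     else:
--         finish = n
--     return iter_col[start:finish + 1]
-- ===== Notes on version B (the rewrite author's own statement) =====
-- stated objective: simpler
-- what changed: Replaces the enumerate/flag state machine with two delimited membership searches (index on the list, then on the tail after the first hit) and one final slice.
import Mathlib
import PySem

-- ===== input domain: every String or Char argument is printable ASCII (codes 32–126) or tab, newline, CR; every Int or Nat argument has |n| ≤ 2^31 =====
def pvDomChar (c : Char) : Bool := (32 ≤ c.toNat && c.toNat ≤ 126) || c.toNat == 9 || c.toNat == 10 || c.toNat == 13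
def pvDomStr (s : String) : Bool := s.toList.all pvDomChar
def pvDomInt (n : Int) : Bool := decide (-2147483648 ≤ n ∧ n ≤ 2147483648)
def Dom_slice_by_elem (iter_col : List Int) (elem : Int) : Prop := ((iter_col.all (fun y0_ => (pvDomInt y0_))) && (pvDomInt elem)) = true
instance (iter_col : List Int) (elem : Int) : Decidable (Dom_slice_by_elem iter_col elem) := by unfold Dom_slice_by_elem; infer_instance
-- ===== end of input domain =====

-- B replaces A's enumerate/flag state machine with two delimited index searches and one slice (objective: simpler).


-- ===== PORT A =====
-- the for-loop with its flag and break, as structural recursion over enumerate(iter_col)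
def sliceLoopA (elem : Int) (st fin : Int) (flag : Bool) : List (Int × Int) → Int × Int
  | [] => (st, fin)
  | (ind, x) :: rest =>
    if x == elem then
      if !flag then sliceLoopA elem ind fin true rest
      else (st, ind)          -- finish_ind = ind; break
    else sliceLoopA elem st fin flag rest

def slice_by_elem (iter_col : List Int) (elem : Int) : List Int :=
  let n : Int := iter_col.length
  let sf := sliceLoopA elem n n false (PySem.List.enumerate iter_col 0)
  PySem.List.slice iter_col (some sf.1) (some (sf.2 + 1))

-- ===== PORT B =====
def slice_by_elem_alt (iter_col : List Int) (elem : Int) : List Int :=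
  let n : Int := iter_col.length
  match PySem.List.index? iter_col elem with
  | none => PySem.List.slice iter_col (some n) (some (n + 1))
  | some start =>
    let rest := PySem.List.slice iter_col (some ((start : Int) + 1)) none
    let fin : Int :=
      match PySem.List.index? rest elem with
      | some j => (start : Int) + 1 + (j : Int)
      | none => n
    PySem.List.slice iter_col (some (start : Int)) (some (fin + 1))

-- ===== PRECONDITION & SPEC =====
def Spec_slice_by_elem (iter_col : List Int) (elem : Int) (out : List Int) : Prop := out = slice_by_elem_alt iter_col elem
instance (iter_col : List Int) (elem : Int) (out : List Int) : Decidable (Spec_slice_by_elem iter_col elem out) := by unfold Spec_slice_by_elem; infer_instance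

-- ===== CLAIM (what is proved, stated in full; the proofs are below) =====
def Claim_equal_slice_by_elem : Prop := ∀ (iter_col : List Int) (elem : Int), Dom_slice_by_elem iter_col elem → Spec_slice_by_elem iter_col elem (slice_by_elem iter_col elem)

-- ===== LEMMAS AND PROOFS =====

-- after the first hit (flag = true) the loop returns st and the position of the next hit (or fin)
theorem sliceLoopA_true (elem : Int) (xs : List Int) (k st fin : Int) :
    sliceLoopA elem st fin true (PySem.List.enumerate xs k) =
      match PySem.List.index? xs elem with
      | none => (st, fin)
      | some j => (st, k + (j : Int)) := by
  induction xs generalizing k with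
  | nil => simp [PySem.List.enumerate_nil, sliceLoopA, PySem.List.index?]
  | cons x xs ih =>
    rw [PySem.List.enumerate_cons]
    by_cases hx : x = elem
    · subst hx
      rw [PySem.List.index?_cons_self]
      simp [sliceLoopA]
    · rw [PySem.List.index?_cons_of_ne xs hx]
      simp only [sliceLoopA, beq_iff_eq, if_neg hx]
      rw [ih (k + 1)]
      cases h : PySem.List.index? xs elem with
      | none => simp
      | some j => simp [Prod.ext_iff]; omega

-- the whole loop, characterised by the first hit and the next hit after it
theorem sliceLoopA_false (elem : Int) (xs : List Int) (k st fin : Int) :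
    sliceLoopA elem st fin false (PySem.List.enumerate xs k) =
      match PySem.List.index? xs elem with
      | none => (st, fin)
      | some i =>
        match PySem.List.index? (xs.drop (i + 1)) elem with
        | none => (k + (i : Int), fin)
        | some j => (k + (i : Int), k + (i : Int) + 1 + (j : Int)) := by
  induction xs generalizing k with
  | nil => simp [PySem.List.enumerate_nil, sliceLoopA, PySem.List.index?]
  | cons x xs ih =>
    rw [PySem.List.enumerate_cons]
    by_cases hx : x = elem
    · subst hx
      rw [PySem.List.index?_cons_self]
      simp only [sliceLoopA, beq_self_eq_true, Bool.not_false, if_true]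
      rw [sliceLoopA_true x xs (k + 1) k fin]
      have hdrop : (x :: xs).drop (0 + 1) = xs := rfl
      rw [hdrop]
      cases h : PySem.List.index? xs x with
      | none => simp
      | some j => simp
    · rw [PySem.List.index?_cons_of_ne xs hx]
      simp only [sliceLoopA, beq_iff_eq, if_neg hx]
      rw [ih (k + 1)]
      cases h : PySem.List.index? xs elem with
      | none => simp
      | some i =>
        have hdrop : (x :: xs).drop (i + 1 + 1) = xs.drop (i + 1) := rfl
        simp only [Option.map_some, hdrop]
        cases h2 : PySem.List.index? (xs.drop (i + 1)) elem with
        | none => simp [Prod.ext_iff]; omega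
        | some j => simp [Prod.ext_iff]; omega

-- ===== VERDICT (by name: the statement is the Claim_ definition above) =====
theorem slice_by_elem_spec : Claim_equal_slice_by_elem := by
  intro xs elem _
  unfold Spec_slice_by_elem slice_by_elem slice_by_elem_alt
  cases h : PySem.List.index? xs elem with
  | none =>
    rw [PySem.List.index?_eq_idxOf?] at h
    simp [sliceLoopA_false elem xs 0, h]
  | some i =>
    have hrest : PySem.List.slice xs (some ((i : Int) + 1)) none = xs.drop (i + 1) := by
      rw [show ((i : Int) + 1) = ((i + 1 : Nat) : Int) by push_cast; ring,
        PySem.List.slice_from_natCast]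
    rw [PySem.List.index?_eq_idxOf?] at h
    cases h2 : PySem.List.index? (xs.drop (i + 1)) elem with
    | none =>
      rw [PySem.List.index?_eq_idxOf?] at h2
      simp [sliceLoopA_false elem xs 0, h, hrest, h2]
    | some j =>
      rw [PySem.List.index?_eq_idxOf?] at h2
      simp [sliceLoopA_false elem xs 0, h, hrest, h2]
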